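-- pv_equiv track=rewrite | github.com/kk6/meeting-minutes | src/meeting_minutes/vocabulary.py | _build_section_text
-- ===== SOURCE A (Python) =====
-- def _build_section_text(header: str, terms: list[tuple[str, str]]) -> str:
--     parts = [header]
--     current_section = ""
--     for section, term in terms:
--         if section != current_section:
--             parts.append(f"\n## {section}")
--             current_section = section
--         parts.append(f"- {term}")
--     return "\n".join(parts) + "\n"
-- ===== SOURCE B (Python) =====
-- def _build_section_text(header: str, terms: list[tuple[str, str]]) -> str:
--     # Build the output string directly: scan each consecutive run of equal
--     # section, emit its heading line, then a bullet line per term in the run.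
--     out = header + "\n"
--     i, n = 0, len(terms)
--     while i < n:
--         section = terms[i][0]
--         out += "\n## " + section + "\n"
--         while i < n and terms[i][0] == section:
--             out += "- " + terms[i][1] + "\n"
--             i += 1
--     return out
-- ===== Notes on version B (the rewrite author's own statement) =====
-- stated objective: alternative
-- what changed: Replaces A's parts-list plus current-section comparison (joined at the end) with direct string building over consecutive runs of equal section found by an inner span scan; Pre_ excludes term lists whose first section is the empty string, a degenerate corner where suppressing the heading (A) and emitting an empty heading (B) are both defensible.
-- outside the precondition, e.g. on _build_section_text('h', [('', 't')]): A returns 'h\n- t\n', B returns 'h\n\n## \n- t\n'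
import Mathlib
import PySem

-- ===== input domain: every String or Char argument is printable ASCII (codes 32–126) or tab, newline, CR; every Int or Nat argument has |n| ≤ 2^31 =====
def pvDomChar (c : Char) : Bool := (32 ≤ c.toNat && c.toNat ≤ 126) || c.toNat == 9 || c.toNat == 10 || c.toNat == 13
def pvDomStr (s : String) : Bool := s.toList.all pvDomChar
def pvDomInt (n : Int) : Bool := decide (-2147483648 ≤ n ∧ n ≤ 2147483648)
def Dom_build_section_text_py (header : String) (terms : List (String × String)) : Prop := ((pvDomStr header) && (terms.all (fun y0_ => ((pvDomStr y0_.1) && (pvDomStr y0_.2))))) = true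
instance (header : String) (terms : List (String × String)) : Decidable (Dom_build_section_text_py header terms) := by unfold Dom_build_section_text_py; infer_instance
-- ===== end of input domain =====

-- B builds the string directly over consecutive runs of equal section (span scan) instead of
-- A's parts list + current-section comparison joined at the end; alternative structure, same cost.
-- Pre_ excludes term lists whose first section is "" (a degenerate corner; see Pre_ comment).

-- ===== PORT A =====
-- One loop step of A: maybe append the "\n## section" part and update current_section,
-- then always append the "- term" part.  (String comparison done on .toList: exact, toList is injective.)
def buildStepA (st : List (List Char) × List Char) (p : String × String) : List (List Char) × List Char :=
  let (parts, cur) := st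
  let (parts, cur) :=
    if p.1.toList ≠ cur then (parts ++ [['\n', '#', '#', ' '] ++ p.1.toList], p.1.toList)
    else (parts, cur)
  (parts ++ [['-', ' '] ++ p.2.toList], cur)

def build_section_text_py (header : String) (terms : List (String × String)) : String :=
  let res := terms.foldl buildStepA ([header.toList], [])
  String.ofList (PySem.Chars.join ['\n'] res.1 ++ ['\n'])

-- ===== PORT B =====
-- dropWhile strictly shrinks the list when its head satisfies the predicate (termination of B's outer loop)
theorem pvDropWhileLt {α : Type} (q : α → Bool) (x : α) (xs : List α) (hx : q x = true) :
    ((x :: xs).dropWhile q).length < (x :: xs).length := by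
  rw [List.dropWhile_cons_of_pos hx]
  exact Nat.lt_succ_of_le (List.Sublist.length_le (List.dropWhile_sublist q))

-- Outer while loop of B: take the run of the head's section, emit its heading and lines, recurse on the rest.
def buildGroupsB (terms : List (String × String)) : List Char :=
  match h : terms with
  | [] => []
  | (s, _) :: rest =>
    let grp := terms.takeWhile (fun p => p.1 == s)
    let rest' := terms.dropWhile (fun p => p.1 == s)
    ['\n', '#', '#', ' '] ++ s.toList ++ ['\n']
      ++ (grp.map (fun p => ['-', ' '] ++ p.2.toList ++ ['\n'])).flatten
      ++ buildGroupsB rest'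
termination_by terms.length
decreasing_by
  subst h; exact pvDropWhileLt _ _ rest (by simp)

def build_section_text_py_alt (header : String) (terms : List (String × String)) : String :=
  String.ofList (header.toList ++ ['\n'] ++ buildGroupsB terms)

-- ===== PRECONDITION & SPEC =====
-- Pre_ excludes term lists whose first section is the empty string: there A suppresses the
-- heading only because current_section is initialized to "", while B emits an empty heading —
-- a degenerate corner where either output is defensible; everywhere else A and B agree.
def Pre_build_section_text_py (header : String) (terms : List (String × String)) : Prop :=
  (terms.head?.all (fun p => p.1 != "")) = true
instance (header : String) (terms : List (String × String)) : Decidable (Pre_build_section_text_py header terms) := by unfold Pre_build_section_text_py; infer_instance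

def pvWitness_build_section_text_py : String × (List (String × String)) :=
  ("# Vocabulary", [("A", "x"), ("A", "y"), ("B", "z")])

def Spec_build_section_text_py (header : String) (terms : List (String × String)) (out : String) : Prop := out = build_section_text_py_alt header terms
instance (header : String) (terms : List (String × String)) (out : String) : Decidable (Spec_build_section_text_py header terms out) := by unfold Spec_build_section_text_py; infer_instance

-- ===== CLAIM (what is proved, stated in full; the proofs are below) =====
def Claim_equal_build_section_text_py : Prop := ∀ (header : String) (terms : List (String × String)), Dom_build_section_text_py header terms → Pre_build_section_text_py header terms → Spec_build_section_text_py header terms (build_section_text_py header terms)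

-- ===== LEMMAS AND PROOFS =====

-- The parts A's loop appends, as a function of the incoming current_section.
def linesA (cur : List Char) : List (String × String) → List (List Char)
  | [] => []
  | (s, t) :: rest =>
    (if s.toList ≠ cur then [['\n', '#', '#', ' '] ++ s.toList] else [])
      ++ [['-', ' '] ++ t.toList] ++ linesA s.toList rest

theorem foldl_buildStepA (terms : List (String × String)) (parts : List (List Char)) (cur : List Char) :
    (terms.foldl buildStepA (parts, cur)).1 = parts ++ linesA cur terms := by
  induction terms generalizing parts cur with
  | nil => simp [linesA]
  | cons p rest ih =>
    obtain ⟨s, t⟩ := p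
    by_cases h : s.toList = cur
    · simp [List.foldl_cons, buildStepA, h, ih, linesA]
    · simp [List.foldl_cons, buildStepA, h, ih, linesA]

-- "\n".join(parts) + "\n" flattens each part followed by a newline (parts nonempty).
theorem join_newline (p : List Char) (ps : List (List Char)) :
    PySem.Chars.join ['\n'] (p :: ps) ++ ['\n'] = ((p :: ps).map (· ++ ['\n'])).flatten := by
  induction ps generalizing p with
  | nil => simp [PySem.Chars.join_singleton]
  | cons q qs ih =>
    rw [PySem.Chars.join_cons_cons]
    simp only [List.map_cons, List.flatten_cons] at ih ⊢
    rw [List.append_assoc, List.append_assoc, ih q]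
    simp

-- A run of equal sections produces no headers in A.
theorem linesA_run (s : String) (grp rest : List (String × String))
    (hgrp : ∀ p ∈ grp, p.1 = s) :
    linesA s.toList (grp ++ rest) = grp.map (fun p => ['-', ' '] ++ p.2.toList) ++ linesA s.toList rest := by
  induction grp with
  | nil => simp
  | cons p grp ih =>
    obtain ⟨s', t⟩ := p
    have hs : s' = s := hgrp (s', t) (by simp)
    subst hs
    simp only [List.cons_append, linesA, ite_not, List.nil_append, List.map_cons]
    rw [ih (fun q hq => hgrp q (by simp [hq]))]
    simp

-- Main correspondence between A's parts (after the header) and B's grouped output,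
-- valid whenever the head's section differs from the incoming current_section.
theorem linesA_eq_buildGroupsB (n : Nat) (terms : List (String × String)) (cur : List Char)
    (hn : terms.length ≤ n)
    (hhead : ∀ p ∈ terms.head?, p.1.toList ≠ cur) :
    ((linesA cur terms).map (· ++ ['\n'])).flatten = buildGroupsB terms := by
  induction n generalizing terms cur with
  | zero =>
    have : terms = [] := List.length_eq_zero_iff.mp (Nat.le_zero.mp hn)
    subst this; simp [linesA, buildGroupsB]
  | succ n ih =>
    match h : terms with
    | [] => simp [linesA, buildGroupsB]
    | (s, t) :: rest =>
      rw [buildGroupsB]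
      have hsplit : rest = rest.takeWhile (fun p => p.1 == s) ++ rest.dropWhile (fun p => p.1 == s) :=
        (List.takeWhile_append_dropWhile).symm
      have hgrp : ∀ p ∈ rest.takeWhile (fun p => p.1 == s), p.1 = s := by
        intro p hp
        have := List.mem_takeWhile_imp hp
        simpa using this
      have hdw : ((s, t) :: rest).dropWhile (fun p => p.1 == s) = rest.dropWhile (fun p => p.1 == s) := by
        simp [List.dropWhile_cons_of_pos]
      have htw : ((s, t) :: rest).takeWhile (fun p => p.1 == s) = (s, t) :: rest.takeWhile (fun p => p.1 == s) := by
        simp [List.takeWhile_cons_of_pos]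
      rw [hdw, htw]
      rw [linesA]
      conv_lhs => rw [hsplit]
      rw [linesA_run s _ _ hgrp]
      -- A emits the heading part here: the head's section differs from current_section
      have hne : s.toList ≠ cur := hhead (s, t) (by simp)
      -- tail: apply IH to rest'
      have htail : ((linesA s.toList (rest.dropWhile (fun p => p.1 == s))).map (· ++ ['\n'])).flatten
          = buildGroupsB (rest.dropWhile (fun p => p.1 == s)) := by
        apply ih
        · calc (rest.dropWhile (fun p => p.1 == s)).length
              ≤ rest.length := List.Sublist.length_le (List.dropWhile_sublist _)
            _ ≤ n := by simpa using Nat.lt_succ_iff.mp (Nat.lt_of_lt_of_le (Nat.lt_succ_of_le (Nat.le_refl _)) hn)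
        · intro p hp
          have hne' : ¬ (p.1 == s) = true := by
            intro hq
            exact absurd hq (by
              have := List.head?_dropWhile_not (fun p => p.1 == s) rest
              simp only [Option.mem_def] at hp
              simpa [hp] using this)
          intro hts
          exact hne' (by simp [String.toList_inj.mp hts])
      simp only [List.append_assoc, List.map_append, List.flatten_append, List.map_cons,
        List.flatten_cons, List.map_map]
      rw [if_pos hne, htail]
      simp [Function.comp_def]

-- ===== VERDICT (by name: the statement is the Claim_ definition above) =====
theorem build_section_text_py_spec : Claim_equal_build_section_text_py := by
  intro header terms _ hpre
  unfold Spec_build_section_text_py build_section_text_py build_section_text_py_alt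
  show String.ofList (PySem.Chars.join ['\n'] (terms.foldl buildStepA ([header.toList], [])).1 ++ ['\n']) = _
  rw [show (terms.foldl buildStepA ([header.toList], [])).1 = [header.toList] ++ linesA [] terms
      from foldl_buildStepA terms [header.toList] [], List.singleton_append, join_newline]
  rw [show ((header.toList :: linesA [] terms).map (· ++ ['\n'])).flatten
      = header.toList ++ ['\n'] ++ ((linesA [] terms).map (· ++ ['\n'])).flatten by simp]
  rw [linesA_eq_buildGroupsB terms.length terms [] (Nat.le_refl _) ?_]
  · intro p hp
    unfold Pre_build_section_text_py at hpre
    simp only [Option.mem_def] at hp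
    rw [hp] at hpre
    simp only [Option.all_some, bne_iff_ne, ne_eq, decide_eq_true_eq] at hpre
    intro hts
    exact hpre (String.toList_inj.mp (by simpa using hts))
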